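-- pv_equiv track=rewrite | github.com/hieuducnguyen/BigOCourse | 28_DB1/1_Bytelandian_gold_coins.py | max_coin
-- ===== SOURCE A (Python) =====
-- def max_coin(n, dp):
--     if n < 10 ** 6 and dp[n] >= 0:
--         return dp[n]
--     if n < 10 ** 6:
--         dp[n] = max(max_coin(n // 2, dp) + max_coin(n // 3, dp) + max_coin(n // 4, dp), n)
--         return dp[n]
--     else:
--         return max(max_coin(n // 2, dp) + max_coin(n // 3, dp) + max_coin(n // 4, dp), n)
-- ===== SOURCE B (Python) =====
-- def max_coin(n, dp):
--     # Bottom-up tabulation instead of A's top-down recursion; dp is read-only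
--     # (A mutates the caller's dp in place; the equivalence is about the return value).
--     LIM = 10 ** 6
--     if n < LIM and dp[n] >= 0:
--         return dp[n]
--     # Every subproblem reachable from n by //2, //3, //4 is n // (2**a * 3**b):
--     # enumerate those divisors, then fill a table in increasing order
--     # (base: a coin of value 0 is worth 0).
--     divs = []
--     p2 = 1
--     while p2 <= n:
--         d = p2
--         while d <= n:
--             divs.append(d)
--             d *= 3
--         p2 *= 2
--     val = {}
--     for q in sorted({n // d for d in divs} | {0}):
--         if q < LIM and dp[q] >= 0:
--             val[q] = dp[q]
--         elif q == 0:
--             val[q] = 0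
--         else:
--             val[q] = max(val[q // 2] + val[q // 3] + val[q // 4], q)
--     return val[n]
-- ===== Notes on version B (the rewrite author's own statement) =====
-- stated objective: alternative
-- what changed: B replaces A's top-down memoized recursion (which mutates the caller's dp) by a non-recursive bottom-up tabulation: it enumerates the closed-form set of all subproblems n // (2**a * 3**b), sorts it, and fills a value table in increasing order, leaving dp unmutated.
-- outside the precondition, e.g. on max_coin(4, [-1, 1, 1, -1, -1]): A returns 4, B returns 4; on max_coin(-3, [0, -33, -3, 8]): A returns 40, B raises KeyError
import Mathlib
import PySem

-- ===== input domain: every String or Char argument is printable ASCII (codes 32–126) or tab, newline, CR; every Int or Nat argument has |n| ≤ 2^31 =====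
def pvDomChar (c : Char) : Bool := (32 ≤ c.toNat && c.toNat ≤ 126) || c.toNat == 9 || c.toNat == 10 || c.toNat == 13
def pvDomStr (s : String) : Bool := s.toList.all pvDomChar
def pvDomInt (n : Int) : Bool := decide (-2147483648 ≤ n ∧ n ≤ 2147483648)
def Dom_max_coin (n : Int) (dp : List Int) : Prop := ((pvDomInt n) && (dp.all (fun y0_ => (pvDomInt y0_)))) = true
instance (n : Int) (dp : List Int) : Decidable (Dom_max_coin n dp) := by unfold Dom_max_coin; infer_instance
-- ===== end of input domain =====

-- B replaces A's top-down memoized recursion by a bottom-up tabulation over the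
-- closed-form set of subproblems n // (2^a * 3^b); A mutates dp in place, B does not —
-- the equivalence proved here is about the RETURN value only.

-- ===== PORT A =====
-- A threads the mutable list dp through the recursion; fuel only guards totality
-- (inside Pre_ the recursion depth is at most n, so fuel n.natAbs+2 suffices).
def goA : Nat → Int → List Int → Option (Int × List Int)
  | 0, _, _ => none
  | fuel+1, n, dp =>
    if n < 1000000 then
      match PySem.List.pyGet? dp n with
      | none => none
      | some v =>
        if 0 ≤ v then some (v, dp)
        else
          match goA fuel (PySem.Int.floordiv n 2) dp with
          | none => none
          | some (x2, dp2) =>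
            match goA fuel (PySem.Int.floordiv n 3) dp2 with
            | none => none
            | some (x3, dp3) =>
              match goA fuel (PySem.Int.floordiv n 4) dp3 with
              | none => none
              | some (x4, dp4) =>
                match PySem.List.pySet? dp4 n (max (x2 + x3 + x4) n) with
                | none => none
                | some dp5 =>
                  match PySem.List.pyGet? dp5 n with
                  | none => none
                  | some r => some (r, dp5)
    else
      match goA fuel (PySem.Int.floordiv n 2) dp with
      | none => none
      | some (x2, dp2) =>
        match goA fuel (PySem.Int.floordiv n 3) dp2 with
        | none => none
        | some (x3, dp3) =>
          match goA fuel (PySem.Int.floordiv n 4) dp3 with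
          | none => none
          | some (x4, _dp4) => some (max (x2 + x3 + x4) n, _dp4)

def max_coin (n : Int) (dp : List Int) : Int :=
  match goA (n.natAbs + 2) n dp with
  | some (v, _) => v
  | none => 0

-- ===== PORT B =====
-- B's two while-loops enumerate the divisors 2^a * 3^b ≤ n; the fixed fuel 64 only
-- guards totality (on Dom, |n| ≤ 2^31, so at most 32 resp. 21 iterations happen).
def pows3 : Nat → Int → Int → List Int
  | 0, _, _ => []
  | fuel+1, n, d => if d ≤ n then d :: pows3 fuel n (d * 3) else []

def divsB : Nat → Int → Int → List Int
  | 0, _, _ => []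
  | fuel+1, n, p2 => if p2 ≤ n then pows3 64 n p2 ++ divsB fuel n (p2 * 2) else []

-- body of the `for q in sorted(...)` loop, Option = error (KeyError/IndexError)
def stepB2 (val : PySem.Dict Int Int) (q : Int) : Option (PySem.Dict Int Int) :=
  if q = 0 then some (val.insert q 0)
  else
    match val.get? (PySem.Int.floordiv q 2), val.get? (PySem.Int.floordiv q 3),
          val.get? (PySem.Int.floordiv q 4) with
    | some a, some b, some c => some (val.insert q (max (a + b + c) q))
    | _, _, _ => none

def stepB (dp : List Int) (acc : Option (PySem.Dict Int Int)) (q : Int) :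
    Option (PySem.Dict Int Int) :=
  match acc with
  | none => none
  | some val =>
    if q < 1000000 then
      match PySem.List.pyGet? dp q with
      | none => none
      | some v => if 0 ≤ v then some (val.insert q v) else stepB2 val q
    else stepB2 val q

def restB (n : Int) (dp : List Int) : Int :=
  let divs := divsB 64 n 1
  let qs := PySem.List.sorted
    (PySem.Set.ofList (divs.map (fun d => PySem.Int.floordiv n d) ++ [0])) (fun x => x)
  match qs.foldl (stepB dp) (some PySem.Dict.empty) with
  | none => 0
  | some val => (val.get? n).getD 0

def max_coin_alt (n : Int) (dp : List Int) : Int :=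
  if n < 1000000 then
    match PySem.List.pyGet? dp n with
    | none => 0
    | some v => if 0 ≤ v then v else restB n dp
  else restB n dp

-- ===== PRECONDITION & SPEC =====
-- Pre_ admits: an immediate cache hit (any n, including Python's negative-index
-- lookup), and otherwise 0 ≤ n with dp long enough for every index the programs
-- touch and a seeded base (dp[0] ≥ 0, or dp[1..3] ≥ 0 so index 0 is never reached
-- uncached).  It excludes exactly the inputs where A raises IndexError or
-- RecursionError, plus — a stated narrowing — some inputs where an intermediate
-- cached entry stops A's recursion before the missing base dp[0] or the missing
-- part of a short dp is reached, on which A still returns, and negative n without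
-- an immediate hit, where any value A returns comes from Python's negative-index
-- wraparound and B's bottom-up table raises KeyError (see the cites).
def Pre_max_coin (n : Int) (dp : List Int) : Prop :=
  (n < 1000000 ∧ 0 ≤ (PySem.List.pyGet? dp n).getD (-1))
  ∨ (0 ≤ n
     ∧ (n < 1000000 → n < (dp.length : Int))
     ∧ (1000000 ≤ n → (1000000 : Int) ≤ (dp.length : Int))
     ∧ (0 ≤ dp.getD 0 (-1)
        ∨ (1 ≤ n ∧ ∀ j ∈ ([1, 2, 3] : List Nat), (j : Int) ≤ n → 0 ≤ dp.getD j (-1))))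
instance (n : Int) (dp : List Int) : Decidable (Pre_max_coin n dp) := by
  unfold Pre_max_coin; infer_instance

def pvWitness_max_coin : Int × List Int := (3, [0, -1, -1, -1])

def Spec_max_coin (n : Int) (dp : List Int) (out : Int) : Prop := out = max_coin_alt n dp
instance (n : Int) (dp : List Int) (out : Int) : Decidable (Spec_max_coin n dp out) := by
  unfold Spec_max_coin; infer_instance

-- ===== CLAIM (what is proved, stated in full; the proofs are below) =====
def Claim_equal_max_coin : Prop := ∀ (n : Int) (dp : List Int),
  Dom_max_coin n dp → Pre_max_coin n dp → Spec_max_coin n dp (max_coin n dp)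

-- ===== LEMMAS AND PROOFS =====

-- The value both programs compute: the cache-relative recurrence, with base
-- "dp holds a cached value ≥ 0 below 10^6" (junk 0 at the uncached 0 case).
def specC (dp : List Int) (k : Nat) : Int :=
  if k < 1000000 ∧ 0 ≤ dp.getD k (-1) then dp.getD k (-1)
  else if k = 0 then 0
  else max (specC dp (k / 2) + specC dp (k / 3) + specC dp (k / 4)) (k : Int)
termination_by k
decreasing_by all_goals omega

lemma specC_base {dp0 : List Int} {k : Nat} (hk : k < 1000000)
    (hv : 0 ≤ dp0.getD k (-1)) : specC dp0 k = dp0.getD k (-1) := by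
  rw [specC]; exact if_pos ⟨hk, hv⟩

lemma specC_step {dp0 : List Int} {k : Nat} (hk : k ≠ 0)
    (hnb : ¬(k < 1000000 ∧ 0 ≤ dp0.getD k (-1))) :
    specC dp0 k = max (specC dp0 (k / 2) + specC dp0 (k / 3) + specC dp0 (k / 4)) (k : Int) := by
  rw [specC, if_neg hnb, if_neg hk]

lemma specC_zero {dp0 : List Int} (h : ¬ 0 ≤ dp0.getD 0 (-1)) : specC dp0 0 = 0 := by
  rw [specC, if_neg (fun hc => h hc.2), if_pos rfl]


-- ---------- A-side ----------
-- A's dp-list invariant: d agrees with the initial dp0 on cached entries, and any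
-- entry ≥ 0 below 10^6 holds the specC value.
def GoodL (dp0 d : List Int) : Prop :=
  d.length = dp0.length ∧
  ∀ i : Nat, i < 1000000 → i < dp0.length →
    (0 ≤ dp0.getD i (-1) → d.getD i (-1) = dp0.getD i (-1)) ∧
    (0 ≤ d.getD i (-1) → d.getD i (-1) = specC dp0 i)

-- the seeded-base condition Pre_ guarantees (in Nat form)
def SafeN (dp0 : List Int) (nTop : Nat) : Prop :=
  0 ≤ dp0.getD 0 (-1) ∨ ∀ j ∈ ([1, 2, 3] : List Nat), j ≤ nTop → 0 ≤ dp0.getD j (-1)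

lemma getD_set_ne_pv (l : List Int) (k : Nat) (a : Int) (i : Nat) (hik : i ≠ k) :
    (l.set k a).getD i (-1) = l.getD i (-1) := by
  simp [List.getD, List.getElem?_set_ne (by omega : k ≠ i)]

lemma getD_set_self_pv (l : List Int) (a : Int) (k : Nat) (h : k < l.length) :
    (l.set k a).getD k (-1) = a := by
  simp [List.getD, h]

lemma goA_ok (dp0 : List Int) (nTop : Nat) (hsafe : SafeN dp0 nTop)
    (hreach : ∀ m : Nat, m < 1000000 → m ≤ nTop → m < dp0.length) :
    ∀ fuel (k : Nat) (d : List Int), k < fuel → k ≤ nTop →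
      (k = 0 → 0 ≤ dp0.getD 0 (-1)) → GoodL dp0 d →
      ∃ d', goA fuel (k : Int) d = some (specC dp0 k, d') ∧ GoodL dp0 d' := by
  intro fuel
  induction fuel with
  | zero => intro k d hk _ _ _; omega
  | succ fuel ih =>
    intro k d hfuel hkle hk0 hgood
    obtain ⟨hlen, hinv⟩ := hgood
    have hf2 : PySem.Int.floordiv (k : Int) 2 = ((k / 2 : Nat) : Int) := by
      exact_mod_cast PySem.Int.floordiv_natCast k 2
    have hf3 : PySem.Int.floordiv (k : Int) 3 = ((k / 3 : Nat) : Int) := by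
      exact_mod_cast PySem.Int.floordiv_natCast k 3
    have hf4 : PySem.Int.floordiv (k : Int) 4 = ((k / 4 : Nat) : Int) := by
      exact_mod_cast PySem.Int.floordiv_natCast k 4
    by_cases hksmall : (k : Int) < 1000000
    · have hk6 : k < 1000000 := by exact_mod_cast hksmall
      have hklen : k < dp0.length := hreach k hk6 hkle
      have hklen' : k < d.length := by omega
      have hget : PySem.List.pyGet? d (k : Int) = some d[k] := by
        simp [List.getElem?_eq_getElem hklen']
      have hgd : d.getD k (-1) = d[k] := List.getD_eq_getElem d (-1) hklen'
      by_cases hv : (0 : Int) ≤ d[k]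
      · refine ⟨d, ?_, hlen, hinv⟩
        have hspec : d[k] = specC dp0 k := by
          have h2 := (hinv k hk6 hklen).2
          rw [hgd] at h2; exact h2 hv
        simp only [goA]
        rw [if_pos hksmall]
        simp only [hget]
        rw [if_pos hv, hspec]
      · have hdp0k : ¬ (0 : Int) ≤ dp0.getD k (-1) := by
          intro hc
          have h1 := (hinv k hk6 hklen).1 hc
          rw [hgd] at h1; rw [h1] at hv; exact hv hc
        have hknz : k ≠ 0 := by rintro rfl; exact hdp0k (hk0 rfl)
        have hchild0 : ∀ c : Nat, 2 ≤ c → c ≤ 4 → (k / c = 0 → 0 ≤ dp0.getD 0 (-1)) := by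
          intro c hc2 hc4 hzero
          have hk3 : k ≤ 3 := by
            by_contra hgt
            have h1 : 1 ≤ k / c := (Nat.one_le_div_iff (by omega)).mpr (by omega)
            omega
          rcases hsafe with h | h
          · exact h
          · exact absurd (h k (by simp; omega) (by omega)) hdp0k
        obtain ⟨d2, e2, g2⟩ := ih (k / 2) d (by omega) (by omega)
          (hchild0 2 (by norm_num) (by norm_num)) ⟨hlen, hinv⟩
        obtain ⟨d3, e3, g3⟩ := ih (k / 3) d2 (by omega) (by omega)
          (hchild0 3 (by norm_num) (by norm_num)) g2
        obtain ⟨d4, e4, g4⟩ := ih (k / 4) d3 (by omega) (by omega)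
          (hchild0 4 (by norm_num) (by norm_num)) g3
        have hspecs : specC dp0 k
            = max (specC dp0 (k / 2) + specC dp0 (k / 3) + specC dp0 (k / 4)) (k : Int) :=
          specC_step hknz (fun h => hdp0k h.2)
        have hk4len : k < d4.length := by rw [g4.1]; omega
        have hset : PySem.List.pySet? d4 (k : Int)
              (max (specC dp0 (k / 2) + specC dp0 (k / 3) + specC dp0 (k / 4)) (k : Int))
            = some (d4.set k (max (specC dp0 (k / 2) + specC dp0 (k / 3) + specC dp0 (k / 4)) (k : Int))) :=
          PySem.List.pySet?_natCast d4 k _ hk4len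
        refine ⟨d4.set k (max (specC dp0 (k / 2) + specC dp0 (k / 3) + specC dp0 (k / 4)) (k : Int)), ?_, ?_⟩
        · simp only [goA]
          rw [if_pos hksmall]
          simp only [hget]
          rw [if_neg hv, hf2, hf3, hf4]
          have hgs : PySem.List.pyGet?
              (d4.set k (max (specC dp0 (k / 2) + specC dp0 (k / 3) + specC dp0 (k / 4)) (k : Int))) (k : Int)
              = some (max (specC dp0 (k / 2) + specC dp0 (k / 3) + specC dp0 (k / 4)) (k : Int)) := by
            have hlen5 : k < (d4.set k (max (specC dp0 (k / 2) + specC dp0 (k / 3) + specC dp0 (k / 4)) (k : Int))).length := by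
              simpa using hk4len
            simp [List.getElem?_eq_getElem hlen5]
          simp only [e2, e3, e4, hset, hgs]
          rw [hspecs]
        · obtain ⟨l4, i4⟩ := g4
          refine ⟨by simpa using l4, ?_⟩
          intro i hi hil
          by_cases hik : i = k
          · subst hik
            refine ⟨fun hc => absurd hc hdp0k, fun _ => ?_⟩
            rw [getD_set_self_pv _ _ _ hk4len, ← hspecs]
          · rw [getD_set_ne_pv _ _ _ _ hik]; exact i4 i hi hil
    · have hk6 : 1000000 ≤ k := by omega
      obtain ⟨d2, e2, g2⟩ := ih (k / 2) d (by omega) (by omega) (by intro hz; omega) ⟨hlen, hinv⟩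
      obtain ⟨d3, e3, g3⟩ := ih (k / 3) d2 (by omega) (by omega) (by intro hz; omega) g2
      obtain ⟨d4, e4, g4⟩ := ih (k / 4) d3 (by omega) (by omega) (by intro hz; omega) g3
      have hspecs : specC dp0 k
          = max (specC dp0 (k / 2) + specC dp0 (k / 3) + specC dp0 (k / 4)) (k : Int) := by
        refine specC_step (by omega) (fun h => ?_)
        omega
      refine ⟨d4, ?_, g4⟩
      simp only [goA]
      rw [if_neg hksmall, hf2, hf3, hf4, hspecs]
      simp only [e2, e3, e4]


-- ---------- B-side ----------
lemma le_mul_pows (p2 : Int) (hp : 1 ≤ p2) (a b : Nat) : p2 ≤ p2 * 2 ^ a * 3 ^ b := by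
  have h2 : (1 : Int) ≤ 2 ^ a := one_le_pow₀ (by norm_num)
  have h3 : (1 : Int) ≤ 3 ^ b := one_le_pow₀ (by norm_num)
  have hp0 : (0 : Int) ≤ p2 := by linarith
  have s1 : p2 * 1 ≤ p2 * 2 ^ a := mul_le_mul_of_nonneg_left h2 hp0
  have s2 : p2 * 2 ^ a * 1 ≤ p2 * 2 ^ a * 3 ^ b :=
    mul_le_mul_of_nonneg_left h3 (by nlinarith)
  simp only [mul_one] at s1 s2
  linarith

lemma mem_pows3 (fuel : Nat) : ∀ (d : Int), 1 ≤ d → ∀ (n x : Int),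
    (x ∈ pows3 fuel n d ↔ ∃ b : Nat, b < fuel ∧ x = d * 3 ^ b ∧ d * 3 ^ b ≤ n) := by
  induction fuel with
  | zero => intro d hd n x; simp [pows3]
  | succ fuel ih =>
    intro d hd n x
    simp only [pows3]
    by_cases hdn : d ≤ n
    · rw [if_pos hdn]
      constructor
      · intro hx
        rcases List.mem_cons.mp hx with rfl | hx'
        · exact ⟨0, by omega, by ring_nf, by simpa using hdn⟩
        · obtain ⟨b, hb, hx1, hx2⟩ := (ih (d * 3) (by nlinarith) n x).mp hx'
          refine ⟨b + 1, by omega, ?_, ?_⟩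
          · rw [hx1, pow_succ]; ring
          · rw [pow_succ]; calc d * (3 ^ b * 3) = d * 3 * 3 ^ b := by ring
              _ ≤ n := hx2
      · rintro ⟨b, hb, rfl, hle⟩
        rcases Nat.eq_zero_or_pos b with rfl | hbpos
        · rw [show d * 3 ^ 0 = d by ring]; exact List.mem_cons.mpr (Or.inl rfl)
        · have h3e : (3 : Int) ^ b = 3 ^ (b - 1) * 3 := by rw [← pow_succ]; congr 1; omega
          refine List.mem_cons.mpr (Or.inr ?_)
          refine (ih (d * 3) (by nlinarith) n _).mpr ⟨b - 1, by omega, ?_, ?_⟩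
          · rw [h3e]; ring
          · calc d * 3 * 3 ^ (b - 1) = d * (3 ^ (b - 1) * 3) := by ring
              _ = d * 3 ^ b := by rw [← h3e]
              _ ≤ n := hle
    · rw [if_neg hdn]
      simp only [List.not_mem_nil, false_iff, not_exists]
      rintro b ⟨hb, rfl, hle⟩
      have h3 : (1 : Int) ≤ 3 ^ b := one_le_pow₀ (by norm_num)
      exact hdn (by nlinarith)

lemma mem_divsB (fuel : Nat) : ∀ (p2 : Int), 1 ≤ p2 → ∀ (n x : Int),
    (x ∈ divsB fuel n p2 ↔
      ∃ a b : Nat, a < fuel ∧ b < 64 ∧ x = p2 * 2 ^ a * 3 ^ b ∧ p2 * 2 ^ a * 3 ^ b ≤ n) := by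
  induction fuel with
  | zero => intro p2 hp n x; simp [divsB]
  | succ fuel ih =>
    intro p2 hp n x
    simp only [divsB]
    by_cases hpn : p2 ≤ n
    · rw [if_pos hpn]
      rw [List.mem_append, mem_pows3 64 p2 hp n x, ih (p2 * 2) (by nlinarith) n x]
      constructor
      · rintro (⟨b, hb, rfl, hle⟩ | ⟨a, b, ha, hb, rfl, hle⟩)
        · exact ⟨0, b, by omega, hb, by ring_nf, by simpa using hle⟩
        · refine ⟨a + 1, b, by omega, hb, by rw [pow_succ]; ring, ?_⟩
          calc p2 * 2 ^ (a + 1) * 3 ^ b = p2 * 2 * 2 ^ a * 3 ^ b := by rw [pow_succ]; ring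
            _ ≤ n := hle
      · rintro ⟨a, b, ha, hb, rfl, hle⟩
        rcases Nat.eq_zero_or_pos a with rfl | hapos
        · exact Or.inl ⟨b, hb, by ring_nf, by simpa using hle⟩
        · have h2e : (2 : Int) ^ a = 2 ^ (a - 1) * 2 := by rw [← pow_succ]; congr 1; omega
          refine Or.inr ⟨a - 1, b, by omega, hb, ?_, ?_⟩
          · rw [h2e]; ring
          · calc p2 * 2 * 2 ^ (a - 1) * 3 ^ b = p2 * (2 ^ (a - 1) * 2) * 3 ^ b := by ring
              _ = p2 * 2 ^ a * 3 ^ b := by rw [← h2e]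
              _ ≤ n := hle
    · rw [if_neg hpn]
      simp only [List.not_mem_nil, false_iff, not_exists]
      rintro a b ⟨ha, hb, rfl, hle⟩
      exact hpn (le_trans (le_mul_pows p2 hp a b) hle)

lemma exp_lt_64 {a b : Nat} {n : Int} (hn : n ≤ 2147483648)
    (h : (2 : Int) ^ a * 3 ^ b ≤ n) : a < 64 ∧ b < 64 := by
  have h2 : (1 : Int) ≤ 2 ^ a := one_le_pow₀ (by norm_num)
  have h3 : (1 : Int) ≤ 3 ^ b := one_le_pow₀ (by norm_num)
  constructor
  · by_contra hc
    have h64 : (2 : Int) ^ 64 ≤ 2 ^ a := pow_le_pow_right₀ (by norm_num) (by omega)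
    have h2a : (2 : Int) ^ a ≤ n := le_trans (by nlinarith) h
    have := le_trans h64 h2a
    norm_num at this; omega
  · by_contra hc
    have h64 : (3 : Int) ^ 64 ≤ 3 ^ b := pow_le_pow_right₀ (by norm_num) (by omega)
    have h3b : (3 : Int) ^ b ≤ n := le_trans (by nlinarith) h
    have := le_trans h64 h3b
    norm_num at this; omega

-- the list B sorts: quotients of n by every divisor, plus 0
def QL (N : Nat) : List Int :=
  ((divsB 64 (↑N) 1).map (fun d => PySem.Int.floordiv (↑N) d)) ++ [0]

lemma divs_char {N : Nat} (hbound : ((N : Nat) : Int) ≤ 2147483648) (x : Int) :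
    x ∈ divsB 64 (↑N) 1 ↔ ∃ a b : Nat, x = ((2 ^ a * 3 ^ b : Nat) : Int) ∧ 2 ^ a * 3 ^ b ≤ N := by
  rw [mem_divsB 64 1 (by norm_num)]
  constructor
  · rintro ⟨a, b, _, _, rfl, hle⟩
    refine ⟨a, b, by push_cast; ring, ?_⟩
    have h : ((2 ^ a * 3 ^ b : Nat) : Int) ≤ ((N : Nat) : Int) := by push_cast; nlinarith
    exact_mod_cast h
  · rintro ⟨a, b, rfl, hle⟩
    have hle' : (2 : Int) ^ a * 3 ^ b ≤ ((N : Nat) : Int) := by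
      have : ((2 ^ a * 3 ^ b : Nat) : Int) ≤ ((N : Nat) : Int) := by exact_mod_cast hle
      push_cast at this; linarith
    obtain ⟨ha, hb⟩ := exp_lt_64 hbound hle'
    exact ⟨a, b, ha, hb, by push_cast; ring, by nlinarith⟩

lemma mem_QL {N : Nat} (hbound : ((N : Nat) : Int) ≤ 2147483648) (x : Int) :
    x ∈ QL N ↔ x = 0 ∨ ∃ a b : Nat, 2 ^ a * 3 ^ b ≤ N ∧ x = ((N / (2 ^ a * 3 ^ b) : Nat) : Int) := by
  simp only [QL, List.mem_append, List.mem_map, List.mem_singleton]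
  constructor
  · rintro (⟨d, hd, rfl⟩ | rfl)
    · obtain ⟨a, b, rfl, hle⟩ := (divs_char hbound d).mp hd
      exact Or.inr ⟨a, b, hle, by rw [PySem.Int.floordiv_natCast]⟩
    · exact Or.inl rfl
  · rintro (rfl | ⟨a, b, hle, rfl⟩)
    · exact Or.inr rfl
    · refine Or.inl ⟨((2 ^ a * 3 ^ b : Nat) : Int), ?_, by rw [PySem.Int.floordiv_natCast]⟩
      exact (divs_char hbound _).mpr ⟨a, b, rfl, hle⟩

lemma QL_nonneg {N : Nat} (hbound : ((N : Nat) : Int) ≤ 2147483648) :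
    ∀ x ∈ QL N, 0 ≤ x ∧ x ≤ (N : Int) := by
  intro x hx
  rcases (mem_QL hbound x).mp hx with rfl | ⟨a, b, _, rfl⟩
  · exact ⟨le_refl 0, by exact_mod_cast Nat.zero_le N⟩
  · exact ⟨by exact_mod_cast Nat.zero_le _, by exact_mod_cast Nat.div_le_self N _⟩

lemma n_mem_QL {N : Nat} (hN1 : 1 ≤ N) (hbound : ((N : Nat) : Int) ≤ 2147483648) :
    (N : Int) ∈ QL N := by
  refine (mem_QL hbound _).mpr (Or.inr ⟨0, 0, by simpa using hN1, by norm_num⟩)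

lemma QL_closed {N : Nat} (hbound : ((N : Nat) : Int) ≤ 2147483648) :
    ∀ q ∈ QL N, 1 ≤ q → ∀ c ∈ ([2, 3, 4] : List Int), PySem.Int.floordiv q c ∈ QL N := by
  intro q hq hq1 c hc
  rcases (mem_QL hbound q).mp hq with rfl | ⟨a, b, hle, rfl⟩
  · omega
  · have hstep : ∀ (cn : Nat) (a' b' : Nat), 2 ≤ cn → 2 ^ a' * 3 ^ b' = 2 ^ a * 3 ^ b * cn →
        PySem.Int.floordiv ((N / (2 ^ a * 3 ^ b) : Nat) : Int) (cn : Int) ∈ QL N := by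
      intro cn a' b' hcn hfac
      rw [PySem.Int.floordiv_natCast, Nat.div_div_eq_div_mul]
      rcases Nat.eq_zero_or_pos (N / (2 ^ a * 3 ^ b * cn)) with hz | hpos
      · rw [hz]; exact (mem_QL hbound _).mpr (Or.inl rfl)
      · have hDle : 2 ^ a * 3 ^ b * cn ≤ N :=
          (Nat.one_le_div_iff (by positivity)).mp hpos
        refine (mem_QL hbound _).mpr (Or.inr ⟨a', b', ?_, ?_⟩)
        · rw [hfac]; exact hDle
        · rw [hfac]
      
    simp only [List.mem_cons, List.not_mem_nil, or_false] at hc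
    rcases hc with rfl | rfl | rfl
    · exact_mod_cast hstep 2 (a + 1) b (by omega) (by rw [pow_succ]; ring)
    · exact_mod_cast hstep 3 a (b + 1) (by omega) (by rw [pow_succ]; ring)
    · exact_mod_cast hstep 4 (a + 2) b (by omega) (by rw [pow_succ, pow_succ]; ring)

-- evaluation of one loop iteration when the needed children are already tabulated
lemma stepB2_eval (dp : List Int) (val : PySem.Dict Int Int) (q : Int) (hq1 : 1 ≤ q)
    (hnb : ¬(q.toNat < 1000000 ∧ 0 ≤ dp.getD q.toNat (-1)))
    (hch : ∀ c ∈ ([2, 3, 4] : List Int),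
      val.get? (PySem.Int.floordiv q c) = some (specC dp (PySem.Int.floordiv q c).toNat)) :
    stepB2 val q = some (val.insert q (specC dp q.toNat)) := by
  have hf : ∀ cn : Nat, PySem.Int.floordiv q (cn : Int) = ((q.toNat / cn : Nat) : Int) := by
    intro cn
    conv_lhs => rw [show q = ((q.toNat : Nat) : Int) from (Int.toNat_of_nonneg (by omega)).symm]
    exact PySem.Int.floordiv_natCast q.toNat cn
  have hf2 : PySem.Int.floordiv q 2 = ((q.toNat / 2 : Nat) : Int) := by exact_mod_cast hf 2
  have hf3 : PySem.Int.floordiv q 3 = ((q.toNat / 3 : Nat) : Int) := by exact_mod_cast hf 3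
  have hf4 : PySem.Int.floordiv q 4 = ((q.toNat / 4 : Nat) : Int) := by exact_mod_cast hf 4
  have h2 := hch 2 (by simp); have h3 := hch 3 (by simp); have h4 := hch 4 (by simp)
  rw [hf2, Int.toNat_natCast] at h2
  rw [hf3, Int.toNat_natCast] at h3
  rw [hf4, Int.toNat_natCast] at h4
  unfold stepB2
  rw [if_neg (by omega : ¬ q = 0), hf2, hf3, hf4]
  simp only [h2, h3, h4]
  rw [specC_step (by omega) hnb, Int.toNat_of_nonneg (by omega : (0 : Int) ≤ q)]

lemma stepB_eval (dp : List Int) (val : PySem.Dict Int Int) (q : Int) (hq0 : 0 ≤ q)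
    (hlen : q < 1000000 → q.toNat < dp.length)
    (hch : 1 ≤ q → ∀ c ∈ ([2, 3, 4] : List Int),
      val.get? (PySem.Int.floordiv q c) = some (specC dp (PySem.Int.floordiv q c).toNat)) :
    stepB dp (some val) q = some (val.insert q (specC dp q.toNat)) := by
  simp only [stepB]
  by_cases hsmall : q < 1000000
  · rw [if_pos hsmall]
    have hKlen := hlen hsmall
    have hKsmall : q.toNat < 1000000 := by omega
    have hget : PySem.List.pyGet? dp q = some dp[q.toNat] := by
      conv_lhs => rw [show q = ((q.toNat : Nat) : Int) from (Int.toNat_of_nonneg hq0).symm]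
      rw [PySem.List.pyGet?_natCast]
      exact List.getElem?_eq_getElem hKlen
    have hgd : dp.getD q.toNat (-1) = dp[q.toNat] := List.getD_eq_getElem dp (-1) hKlen
    simp only [hget]
    by_cases hv : (0 : Int) ≤ dp[q.toNat]
    · rw [if_pos hv, specC_base hKsmall (hgd ▸ hv), hgd]
    · rw [if_neg hv]
      by_cases hqz : q = 0
      · subst hqz
        have hnn : ¬ (0 : Int) ≤ dp.getD 0 (-1) := by
          show ¬ (0 : Int) ≤ dp.getD (Int.toNat 0) (-1)
          rw [hgd]; exact hv
        show stepB2 val 0 = some (val.insert 0 (specC dp 0))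
        rw [specC_zero hnn]
        simp [stepB2]
      · exact stepB2_eval dp val q (by omega) (by rw [hgd]; exact fun hc => hv hc.2)
          (hch (by omega))
  · rw [if_neg hsmall]
    exact stepB2_eval dp val q (by omega) (by intro hc; omega) (hch (by omega))

-- the bottom-up fill: over a strictly increasing, child-closed list the table ends
-- up holding specC at every processed key
lemma fold_ok (dp : List Int) :
    ∀ (l : List Int) (val : PySem.Dict Int Int),
      l.Pairwise (· < ·) →
      (∀ q ∈ l, 0 ≤ q ∧ (q < 1000000 → q.toNat < dp.length)) →
      (∀ q ∈ l, 1 ≤ q → ∀ c ∈ ([2, 3, 4] : List Int),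
          PySem.Int.floordiv q c ∈ l ∨
            val.get? (PySem.Int.floordiv q c) = some (specC dp (PySem.Int.floordiv q c).toNat)) →
      (∀ k v, val.get? k = some v → v = specC dp k.toNat) →
      ∃ val', l.foldl (stepB dp) (some val) = some val'
        ∧ (∀ q ∈ l, val'.get? q = some (specC dp q.toNat))
        ∧ (∀ k v, val.get? k = some v → val'.get? k = some v) := by
  intro l
  induction l with
  | nil => intro val _ _ _ _; exact ⟨val, rfl, by simp, fun k v h => h⟩
  | cons q rest ih =>
    intro val hpw hb hcl hg
    obtain ⟨hq0, hqlen⟩ := hb q (List.mem_cons_self ..)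
    have hqrest : ∀ y ∈ rest, q < y := (List.pairwise_cons.mp hpw).1
    have hch : 1 ≤ q → ∀ c ∈ ([2, 3, 4] : List Int),
        val.get? (PySem.Int.floordiv q c) = some (specC dp (PySem.Int.floordiv q c).toNat) := by
      intro hq1 c hc
      have hc24 : (2 : Int) ≤ c ∧ c ≤ 4 := by
        simp only [List.mem_cons, List.not_mem_nil, or_false] at hc
        rcases hc with rfl | rfl | rfl <;> norm_num
      have hclt : PySem.Int.floordiv q c < q :=
        (PySem.Int.floordiv_lt_iff_lt_mul (by omega)).mpr (by nlinarith)
      rcases hcl q (List.mem_cons_self ..) hq1 c hc with hmem | hval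
      · rcases List.mem_cons.mp hmem with heq | hmemr
        · exact absurd heq (by omega)
        · exact absurd (hqrest _ hmemr) (by omega)
      · exact hval
    have hstep := stepB_eval dp val q hq0 hqlen hch
    have hg1 : ∀ k v, (val.insert q (specC dp q.toNat)).get? k = some v →
        v = specC dp k.toNat := by
      intro k v h
      rw [PySem.Dict.get?_insert] at h
      split_ifs at h with hk
      · injection h with h'; rw [← h', hk]
      · exact hg k v h
    have hmono1 : ∀ k v, val.get? k = some v →
        (val.insert q (specC dp q.toNat)).get? k = some v := by
      intro k v h
      rw [PySem.Dict.get?_insert]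
      split_ifs with hk
      · rw [hg k v h, hk]
      · exact h
    obtain ⟨val', hfold, hall, hmono⟩ := ih (val.insert q (specC dp q.toNat))
      (List.pairwise_cons.mp hpw).2
      (fun q' hq' => hb q' (List.mem_cons.mpr (Or.inr hq')))
      (by
        intro q' hq' hq1 c hc
        rcases hcl q' (List.mem_cons.mpr (Or.inr hq')) hq1 c hc with hmem | hval
        · rcases List.mem_cons.mp hmem with heq | hmemr
          · right; rw [heq]; exact PySem.Dict.get?_insert_self ..
          · exact Or.inl hmemr
        · right
          rw [PySem.Dict.get?_insert]
          split_ifs with hk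
          · rw [hk]
          · exact hval)
      hg1
    refine ⟨val', ?_, ?_, ?_⟩
    · rw [List.foldl_cons, hstep]; exact hfold
    · intro q' hq'
      rcases List.mem_cons.mp hq' with rfl | hq'r
      · exact hmono q' _ (PySem.Dict.get?_insert_self ..)
      · exact hall q' hq'r
    · intro k v h; exact hmono k v (hmono1 k v h)

lemma restB_ok (dp : List Int) (N : Nat) (hN1 : 1 ≤ N)
    (hbound : ((N : Nat) : Int) ≤ 2147483648)
    (hlen1 : N < 1000000 → N < dp.length) (hlen2 : 1000000 ≤ N → 1000000 ≤ dp.length) :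
    restB (↑N) dp = specC dp N := by
  have hqs_pw : (PySem.List.sorted (PySem.Set.ofList (QL N)) (fun x => x)).Pairwise (· < ·) :=
    PySem.List.sorted_ofList_pairwise_lt (QL N)
  have hqs_mem : ∀ x : Int,
      x ∈ PySem.List.sorted (PySem.Set.ofList (QL N)) (fun x => x) ↔ x ∈ QL N := by
    intro x; rw [PySem.List.mem_sorted, PySem.Set.mem_ofList]
  obtain ⟨val', hfold, hall, -⟩ := fold_ok dp
    (PySem.List.sorted (PySem.Set.ofList (QL N)) (fun x => x)) PySem.Dict.empty hqs_pw
    (fun q hq => by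
      obtain ⟨h0, hle⟩ := QL_nonneg hbound q ((hqs_mem q).mp hq)
      refine ⟨h0, fun hsm => ?_⟩
      by_cases hN : N < 1000000
      · have := hlen1 hN; omega
      · have := hlen2 (by omega); omega)
    (fun q hq hq1 c hc =>
      Or.inl ((hqs_mem _).mpr (QL_closed hbound q ((hqs_mem q).mp hq) hq1 c hc)))
    (fun k v h => by simp [PySem.Dict.get?_empty] at h)
  have hn := hall (↑N) ((hqs_mem _).mpr (n_mem_QL hN1 hbound))
  show (match (PySem.List.sorted (PySem.Set.ofList (QL N)) (fun x => x)).foldl (stepB dp)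
      (some PySem.Dict.empty) with
    | none => 0
    | some val => (val.get? ↑N).getD 0) = specC dp N
  rw [hfold]
  simp only [hn, Int.toNat_natCast, Option.getD_some]

theorem max_coin_spec : Claim_equal_max_coin := by
  intro n dp hdom hpre
  unfold Spec_max_coin
  have hdom' : n ≤ 2147483648 := by
    unfold Dom_max_coin pvDomInt at hdom
    simp only [Bool.and_eq_true, decide_eq_true_eq] at hdom
    exact hdom.1.2
  by_cases hhit : n < 1000000 ∧ 0 ≤ (PySem.List.pyGet? dp n).getD (-1)
  · obtain ⟨hsm, hv⟩ := hhit
    cases hg : PySem.List.pyGet? dp n with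
    | none => rw [hg] at hv; norm_num at hv
    | some v =>
      rw [hg] at hv; simp only [Option.getD_some] at hv
      have hA : max_coin n dp = v := by
        unfold max_coin
        rw [show n.natAbs + 2 = (n.natAbs + 1) + 1 from rfl]
        simp only [goA]
        rw [if_pos hsm]
        simp only [hg]
        rw [if_pos hv]
      have hB : max_coin_alt n dp = v := by
        unfold max_coin_alt
        rw [if_pos hsm]
        simp only [hg]
        rw [if_pos hv]
      rw [hA, hB]
  · have hpre2 : 0 ≤ n ∧ (n < 1000000 → n < (dp.length : Int)) ∧
        (1000000 ≤ n → (1000000 : Int) ≤ (dp.length : Int)) ∧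
        (0 ≤ dp.getD 0 (-1)
          ∨ (1 ≤ n ∧ ∀ j ∈ ([1, 2, 3] : List Nat), (j : Int) ≤ n → 0 ≤ dp.getD j (-1))) := by
      rcases hpre with h | h
      · exact absurd h hhit
      · exact h
    obtain ⟨hn0, hl1, hl2, hsafe⟩ := hpre2
    have hnN : n = (n.toNat : Int) := (Int.toNat_of_nonneg hn0).symm
    have hN1 : 1 ≤ n.toNat := by
      by_contra hz
      have hn00 : n = 0 := by omega
      have h0len : 0 < dp.length := by have := hl1 (by omega); omega
      have hgd0 : dp.getD 0 (-1) = dp[0] := List.getD_eq_getElem dp (-1) h0len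
      rcases hsafe with h | h
      · apply hhit
        refine ⟨by omega, ?_⟩
        rw [hn00, show (0 : Int) = ((0 : Nat) : Int) from rfl, PySem.List.pyGet?_natCast,
          List.getElem?_eq_getElem h0len]
        rw [hgd0] at h
        simpa using h
      · omega
    have hsafeN : SafeN dp n.toNat := by
      rcases hsafe with h | ⟨_, h⟩
      · exact Or.inl h
      · refine Or.inr (fun j hj hjle => h j hj ?_)
        omega
    have hreach : ∀ m : Nat, m < 1000000 → m ≤ n.toNat → m < dp.length := by
      intro m hm hmle
      by_cases hNs : n < 1000000
      · have := hl1 hNs; omega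
      · have := hl2 (by omega); omega
    obtain ⟨d', hA, -⟩ := goA_ok dp n.toNat hsafeN hreach (n.natAbs + 2) n.toNat dp
      (by omega) (le_refl _) (fun h0 => absurd h0 (by omega))
      ⟨rfl, fun i hi hil => ⟨fun _ => rfl, fun h2 => (specC_base hi h2).symm⟩⟩
    have hAv : max_coin n dp = specC dp n.toNat := by
      unfold max_coin
      have hA' : goA (n.toNat + 2) ((n.toNat : Nat) : Int) dp = some (specC dp n.toNat, d') := by
        rwa [show n.natAbs = n.toNat from by omega] at hA
      rw [hnN, Int.natAbs_natCast, show ((n.toNat : Nat) : Int).toNat = n.toNat from by omega, hA']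
    have hB1 : n.toNat < 1000000 → n.toNat < dp.length := by
      intro h; have := hl1 (by omega); omega
    have hB2 : 1000000 ≤ n.toNat → 1000000 ≤ dp.length := by
      intro h; have := hl2 (by omega); omega
    have hrest : restB ((n.toNat : Nat) : Int) dp = specC dp n.toNat :=
      restB_ok dp n.toNat hN1 (by omega) hB1 hB2
    have hBv : max_coin_alt n dp = specC dp n.toNat := by
      unfold max_coin_alt
      by_cases hsm : n < 1000000
      · rw [if_pos hsm]
        have hNlen : n.toNat < dp.length := by have := hl1 hsm; omega
        have hg : PySem.List.pyGet? dp n = some dp[n.toNat] := by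
          conv_lhs => rw [hnN]
          rw [PySem.List.pyGet?_natCast]
          exact List.getElem?_eq_getElem hNlen
        simp only [hg]
        have hv : ¬ (0 : Int) ≤ dp[n.toNat] := by
          intro hv; exact hhit ⟨hsm, by rw [hg]; simpa using hv⟩
        rw [if_neg hv, hnN]
        exact hrest
      · rw [if_neg hsm, hnN]
        exact hrest
    rw [hAv, hBv]
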